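-- pv_equiv track=rewrite | github.com/seanahrens/unarxiv | unarxiv-web/modal_worker/legacy_regex_scripter.py | _rejoin_column_lines
-- ===== SOURCE A (Python) =====
-- def _rejoin_column_lines(text: str) -> str:
--     """Rejoin lines broken by PDF column layout.
--
--     In 2-column PDFs, sentences are broken mid-word or mid-phrase at the
--     column boundary. This heuristic joins a line to the next when the
--     current line doesn't end with sentence-ending punctuation and the next
--     line starts with a lowercase letter (continuation).
--     """
--     lines = text.split("\n")
--     merged: list[str] = []
--     i = 0
--     while i < len(lines):
--         line = lines[i]
--         # Join with next line if: current line ends mid-sentence and next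
--         # line starts with lowercase (continuation)
--         while (
--             i + 1 < len(lines)
--             and line.rstrip()
--             and not line.rstrip()[-1] in ".!?:;\n"
--             and lines[i + 1].strip()
--             and lines[i + 1].strip()[0].islower()
--         ):
--             i += 1
--             line = line.rstrip() + " " + lines[i].strip()
--         merged.append(line)
--         i += 1
--     return "\n".join(merged)
-- ===== SOURCE B (Python) =====
-- def _glue(a: str, b: str) -> bool:
--     """Whether line a glues to following line b (pairwise on the original lines)."""
--     sa, sb = a.strip(), b.strip()
--     return bool(sa) and sa[-1] not in ".!?:;" and bool(sb) and sb[0].islower()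
--
--
-- def _render(group: list[str]) -> str:
--     if len(group) == 1:
--         return group[0]
--     return " ".join([group[0].rstrip()] + [s.strip() for s in group[1:]])
--
--
-- def _rejoin_column_lines(text: str) -> str:
--     lines = text.split("\n")
--     # Stage 1: pairwise glue flags between each line and its successor.
--     flags = [_glue(a, b) for a, b in zip(lines, lines[1:])] + [False]
--     # Stage 2: chunk lines into maximal glued runs; Stage 3: render each run.
--     pieces: list[str] = []
--     group: list[str] = []
--     for line, joined in zip(lines, flags):
--         group.append(line)
--         if not joined:
--             pieces.append(_render(group))
--             group = []
--     return "\n".join(pieces)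
-- ===== Notes on version B (the rewrite author's own statement) =====
-- stated objective: alternative
-- what changed: Replaced A's greedy inner consuming while-loop by a staged pipeline: precompute pairwise glue flags between each ORIGINAL line and its successor (exploiting the provable fact that the join condition depends only on the last original line of a group), chunk lines into maximal glued runs, and render each run with one space-join.
import Mathlib
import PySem

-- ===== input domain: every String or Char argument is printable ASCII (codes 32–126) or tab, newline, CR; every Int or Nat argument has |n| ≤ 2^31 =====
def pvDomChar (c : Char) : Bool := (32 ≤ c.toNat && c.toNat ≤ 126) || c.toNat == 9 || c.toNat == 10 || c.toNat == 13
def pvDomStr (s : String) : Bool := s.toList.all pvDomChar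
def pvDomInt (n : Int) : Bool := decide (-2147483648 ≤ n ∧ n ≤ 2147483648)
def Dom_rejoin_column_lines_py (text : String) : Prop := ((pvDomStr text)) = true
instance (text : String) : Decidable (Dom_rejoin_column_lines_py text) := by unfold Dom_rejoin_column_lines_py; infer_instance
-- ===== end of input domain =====

-- B replaces A's greedy inner consuming while-loop by a staged pipeline (objective:
-- alternative): pairwise glue flags on the ORIGINAL adjacent lines, then chunking into
-- maximal glued runs, then one join per run.

-- ===== PORT A =====
-- A's join test: current merged line ends mid-sentence and next line starts lowercase
def pvCond (line next : List Char) : Bool :=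
  match (PySem.Chars.rstrip line).getLast?, (PySem.Chars.strip next).head? with
  | some c, some d => !((['.', '!', '?', ':', ';', '\n'] : List Char).contains c) && PySem.Chars.islower d
  | _, _ => false

-- line.rstrip() + " " + next.strip()
def pvMerge (line next : List Char) : List Char :=
  PySem.Chars.rstrip line ++ ' ' :: PySem.Chars.strip next

-- A's inner `while`: keep consuming following lines into `line` while the join test holds
def pvInnerA (line : List Char) : List (List Char) → (List Char × List (List Char))
  | [] => (line, [])
  | n :: rs => if pvCond line n then pvInnerA (pvMerge line n) rs else (line, n :: rs)

theorem pvInnerA_len : ∀ (rs : List (List Char)) (line : List Char),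
    (pvInnerA line rs).2.length ≤ rs.length := by
  intro rs
  induction rs with
  | nil => intro line; simp [pvInnerA]
  | cons n rs ih =>
    intro line
    by_cases h : pvCond line n = true
    · simp only [pvInnerA, h, if_true]
      exact le_trans (ih (pvMerge line n)) (Nat.le_succ _)
    · simp [pvInnerA, h]

-- A's outer `while i < len(lines)` loop building `merged`
def pvOuterA : List (List Char) → List (List Char)
  | [] => []
  | l :: rs =>
    let p := pvInnerA l rs
    p.1 :: pvOuterA p.2
termination_by ls => ls.length
decreasing_by
  exact Nat.lt_succ_of_le (pvInnerA_len rs l)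

def rejoin_column_lines_py (text : String) : String :=
  String.ofList (PySem.Chars.join ['\n'] (pvOuterA (PySem.Chars.splitOn text.toList ['\n'])))

-- ===== PORT B =====
-- B's pairwise glue test on two ORIGINAL adjacent lines (Source B: _glue)
def pvGlue (a b : List Char) : Bool :=
  match (PySem.Chars.strip a).getLast?, (PySem.Chars.strip b).head? with
  | some c, some d => !((['.', '!', '?', ':', ';'] : List Char).contains c) && PySem.Chars.islower d
  | _, _ => false

-- Source B: _render (the [] case is unreachable — pvChunk only renders nonempty groups)
def pvRender : List (List Char) → List Char
  | [] => []
  | [x] => x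
  | x :: xs => PySem.Chars.join [' '] (PySem.Chars.rstrip x :: xs.map PySem.Chars.strip)

-- Source B: flags = [_glue(a, b) for a, b in zip(lines, lines[1:])] + [False]
def pvFlags (ls : List (List Char)) : List Bool :=
  (List.zipWith pvGlue ls ls.tail) ++ [false]

-- Source B: the `for line, joined in zip(lines, flags)` chunking loop
def pvChunk (group : List (List Char)) : List (List Char × Bool) → List (List Char)
  | [] => []
  | (l, j) :: rest =>
    if j then pvChunk (group ++ [l]) rest
    else pvRender (group ++ [l]) :: pvChunk [] rest

def rejoin_column_lines_py_alt (text : String) : String :=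
  let lines := PySem.Chars.splitOn text.toList ['\n']
  String.ofList (PySem.Chars.join ['\n'] (pvChunk [] (lines.zip (pvFlags lines))))

-- ===== PRECONDITION & SPEC =====
def Spec_rejoin_column_lines_py (text : String) (out : String) : Prop := out = rejoin_column_lines_py_alt text
instance (text : String) (out : String) : Decidable (Spec_rejoin_column_lines_py text out) := by unfold Spec_rejoin_column_lines_py; infer_instance

-- ===== CLAIM (what is proved, stated in full; the proofs are below) =====
def Claim_equal_rejoin_column_lines_py : Prop := ∀ (text : String), Dom_rejoin_column_lines_py text → Spec_rejoin_column_lines_py text (rejoin_column_lines_py text)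

-- ===== LEMMAS AND PROOFS =====

-- the last non-space character of a list, if any
def pvLastNS : List Char → Option Char
  | [] => none
  | c :: t =>
    match pvLastNS t with
    | some d => some d
    | none => if PySem.Chars.isspace c then none else some c

theorem pv_getLast?_cons_ne (c : Char) (t : List Char) (h : t ≠ []) :
    (c :: t).getLast? = t.getLast? := by
  cases t with
  | nil => exact absurd rfl h
  | cons d u => simp [List.getLast?_cons_cons]
theorem pv_rstrip_cons (c : Char) (t : List Char) :
    PySem.Chars.rstrip (c :: t) =
      if PySem.Chars.rstrip t = [] then (if PySem.Chars.isspace c then [] else [c])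
      else c :: PySem.Chars.rstrip t := by
  simp only [PySem.Chars.rstrip, List.reverse_cons, List.dropWhile_append]
  by_cases h : List.dropWhile PySem.Chars.isspace t.reverse = []
  · by_cases hc : PySem.Chars.isspace c = true <;>
      simp [h, hc, List.dropWhile]
  · simp [h, List.isEmpty_iff]
theorem pv_getLast?_rstrip (s : List Char) :
    (PySem.Chars.rstrip s).getLast? = pvLastNS s := by
  induction s with
  | nil => rfl
  | cons c t ih =>
    rw [pv_rstrip_cons]
    by_cases h : PySem.Chars.rstrip t = []
    · have h0 : pvLastNS t = none := by rw [← ih, h]; rfl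
      by_cases hc : PySem.Chars.isspace c = true <;> simp [h, hc, pvLastNS, h0]
    · have h1 : (PySem.Chars.rstrip t).getLast? = pvLastNS t := ih
      simp only [h, if_false, pvLastNS]
      rw [pv_getLast?_cons_ne c _ h]
      cases h2 : pvLastNS t with
      | some d => exact h1.trans h2
      | none => exact absurd (List.getLast?_eq_none_iff.mp (h1.trans h2)) h
theorem pv_lastNS_lstrip (s : List Char) : pvLastNS (PySem.Chars.lstrip s) = pvLastNS s := by
  induction s with
  | nil => rfl
  | cons c t ih =>
    by_cases hc : PySem.Chars.isspace c = true
    · simp only [PySem.Chars.lstrip, List.dropWhile_cons, hc, if_true]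
      rw [show List.dropWhile PySem.Chars.isspace t = PySem.Chars.lstrip t from rfl, ih]
      simp [pvLastNS, hc]
      cases pvLastNS t <;> simp [hc]
    · simp [PySem.Chars.lstrip, List.dropWhile_cons, hc]
theorem pv_getLast?_strip (s : List Char) :
    (PySem.Chars.strip s).getLast? = pvLastNS s := by
  rw [PySem.Chars.strip, pv_getLast?_rstrip, pv_lastNS_lstrip]
theorem pv_lastNS_isspace {s : List Char} {c : Char} (h : pvLastNS s = some c) :
    PySem.Chars.isspace c = false := by
  induction s with
  | nil => simp [pvLastNS] at h
  | cons d t ih =>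
    simp only [pvLastNS] at h
    cases h2 : pvLastNS t with
    | some e => rw [h2] at h; exact ih (h2.trans (by injection h with h; rw [h]))
    | none =>
      rw [h2] at h
      by_cases hd : PySem.Chars.isspace d = true <;> simp [hd] at h
      subst h; simpa using hd
theorem pv_lastNS_append (u v : List Char) :
    pvLastNS (u ++ v) = match pvLastNS v with | some d => some d | none => pvLastNS u := by
  induction u with
  | nil =>
    cases h : pvLastNS v with
    | none => simpa using h
    | some d => simpa using h
  | cons c t ih =>
    simp only [List.cons_append, pvLastNS, ih]
    cases pvLastNS v <;> cases pvLastNS t <;> rfl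
theorem pv_lastNS_cons_space {c : Char} (hc : PySem.Chars.isspace c = true) (w : List Char) :
    pvLastNS (c :: w) = pvLastNS w := by
  simp only [pvLastNS, hc]
  cases pvLastNS w <;> simp
theorem pv_rstrip_of_last_nonspace {s : List Char} {c : Char}
    (h : s.getLast? = some c) (hc : PySem.Chars.isspace c = false) :
    PySem.Chars.rstrip s = s := by
  rw [PySem.Chars.rstrip]
  rw [← List.head?_reverse] at h
  cases hr : s.reverse with
  | nil => simp [hr] at h
  | cons d u =>
    rw [hr] at h; injection h with h; subst h
    rw [List.dropWhile_cons]
    simp only [hc, Bool.false_eq_true, if_false]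
    rw [← hr, List.reverse_reverse]

theorem pv_lastNS_rstrip (s : List Char) : pvLastNS (PySem.Chars.rstrip s) = pvLastNS s := by
  induction s with
  | nil => rfl
  | cons c t ih =>
    rw [pv_rstrip_cons]
    by_cases h : PySem.Chars.rstrip t = []
    · have h0 : pvLastNS t = none := by rw [← pv_getLast?_rstrip, h]; rfl
      by_cases hc : PySem.Chars.isspace c = true <;> simp [h, hc, pvLastNS, h0]
    · simp only [h, if_false]
      cases h2 : pvLastNS t with
      | none => exact absurd (List.getLast?_eq_none_iff.mp ((pv_getLast?_rstrip t).trans h2)) h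
      | some d => simp [pvLastNS, ih, h2]

theorem pv_lastNS_strip (s : List Char) : pvLastNS (PySem.Chars.strip s) = pvLastNS s := by
  rw [PySem.Chars.strip, pv_lastNS_rstrip, pv_lastNS_lstrip]

theorem pv_strip_ne_nil_of_head? {s : List Char} {d : Char}
    (h : (PySem.Chars.strip s).head? = some d) : ∃ c, pvLastNS s = some c := by
  have hne : PySem.Chars.strip s ≠ [] := by intro hnil; rw [hnil] at h; simp at h
  cases hg : (PySem.Chars.strip s).getLast? with
  | none => exact absurd (List.getLast?_eq_none_iff.mp hg) hne
  | some c => exact ⟨c, by rw [← pv_getLast?_strip, hg]⟩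

theorem pv_join_append_singleton (sep z : List Char) : ∀ (ys : List (List Char)), ys ≠ [] →
    PySem.Chars.join sep (ys ++ [z]) = PySem.Chars.join sep ys ++ sep ++ z := by
  intro ys
  induction ys with
  | nil => intro h; exact absurd rfl h
  | cons y ys ih =>
    intro _
    cases ys with
    | nil => simp [PySem.Chars.join, List.intercalate]
    | cons y1 ys' =>
      have h2 := ih (by simp)
      simp only [List.cons_append] at h2 ⊢
      rw [PySem.Chars.join_cons_cons, h2, PySem.Chars.join_cons_cons]
      simp [List.append_assoc]

theorem pv_cond_eq_glue (line l b : List Char) (h : pvLastNS line = pvLastNS l) :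
    pvCond line b = pvGlue l b := by
  unfold pvCond pvGlue
  rw [pv_getLast?_rstrip, h, ← pv_getLast?_strip]
  cases hg : (PySem.Chars.strip l).getLast? with
  | none => rfl
  | some c =>
    cases (PySem.Chars.strip b).head? with
    | none => rfl
    | some d =>
      have hc : PySem.Chars.isspace c = false :=
        pv_lastNS_isspace (s := l) (by rw [← pv_getLast?_strip]; exact hg)
      have hne : c ≠ '\n' := by
        intro he; subst he; simp [PySem.Chars.isspace] at hc
      simp [hne]

theorem pv_pairs_cons (l : List Char) (rs : List (List Char)) :
    (l :: rs).zip (pvFlags (l :: rs)) =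
      (l, match rs with | [] => false | r :: _ => pvGlue l r) :: rs.zip (pvFlags rs) := by
  cases rs <;> simp [pvFlags, List.zip_cons_cons]

theorem pv_render_snoc (x : List Char) (xs : List (List Char)) (r : List Char) (h : xs ≠ []) :
    pvRender (x :: xs ++ [r]) = pvRender (x :: xs) ++ ' ' :: PySem.Chars.strip r := by
  cases xs with
  | nil => exact absurd rfl h
  | cons y ys =>
    show PySem.Chars.join [' '] (PySem.Chars.rstrip x :: ((y :: ys) ++ [r]).map PySem.Chars.strip)
      = PySem.Chars.join [' '] (PySem.Chars.rstrip x :: (y :: ys).map PySem.Chars.strip) ++ ' ' :: PySem.Chars.strip r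
    rw [List.map_append, List.map_singleton,
        show PySem.Chars.rstrip x :: ((y :: ys).map PySem.Chars.strip ++ [PySem.Chars.strip r])
           = (PySem.Chars.rstrip x :: (y :: ys).map PySem.Chars.strip) ++ [PySem.Chars.strip r] from rfl,
        pv_join_append_singleton _ _ _ (by simp)]
    simp [List.append_assoc]

-- the invariant: A's in-flight merged line IS B's rendered open group
theorem pv_gen : ∀ (rs g : List (List Char)) (l : List Char),
    pvLastNS (pvRender (g ++ [l])) = pvLastNS l →
    (g ≠ [] → PySem.Chars.rstrip (pvRender (g ++ [l])) = pvRender (g ++ [l]) ∧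
              PySem.Chars.strip l ≠ []) →
    (pvInnerA (pvRender (g ++ [l])) rs).1 :: pvOuterA (pvInnerA (pvRender (g ++ [l])) rs).2
      = pvChunk g ((l :: rs).zip (pvFlags (l :: rs))) := by
  intro rs
  induction rs with
  | nil =>
    intro g l _ _
    rw [pv_pairs_cons]
    simp [pvInnerA, pvOuterA, pvChunk, pvFlags]
  | cons r rs' ih =>
    intro g l hinv hrs
    rw [pv_pairs_cons]
    have hcond : pvCond (pvRender (g ++ [l])) r = pvGlue l r := pv_cond_eq_glue _ _ _ hinv
    by_cases hglue : pvGlue l r = true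
    · -- the glue flag is set: A merges, B extends the open group
      obtain ⟨c, hc, d, hd⟩ : ∃ c, (PySem.Chars.strip l).getLast? = some c ∧
          ∃ d, (PySem.Chars.strip r).head? = some d := by
        unfold pvGlue at hglue
        cases h1 : (PySem.Chars.strip l).getLast? with
        | none => rw [h1] at hglue; simp at hglue
        | some c =>
          cases h2 : (PySem.Chars.strip r).head? with
          | none => rw [h1, h2] at hglue; simp at hglue
          | some d => exact ⟨c, rfl, d, rfl⟩
      obtain ⟨c', hc'⟩ := pv_strip_ne_nil_of_head? hd
      have hstripr : PySem.Chars.strip r ≠ [] := by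
        intro h0; rw [h0] at hd; simp at hd
      have hmerge : pvMerge (pvRender (g ++ [l])) r = pvRender ((g ++ [l]) ++ [r]) := by
        cases g with
        | nil =>
          show PySem.Chars.rstrip (pvRender [l]) ++ ' ' :: PySem.Chars.strip r = pvRender [l, r]
          show PySem.Chars.rstrip l ++ ' ' :: PySem.Chars.strip r
            = PySem.Chars.join [' '] [PySem.Chars.rstrip l, PySem.Chars.strip r]
          simp [PySem.Chars.join, List.intercalate]
        | cons x g' =>
          rw [pvMerge, (hrs (by simp)).1,
              show (x :: g') ++ [l] = x :: (g' ++ [l]) from rfl,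
              show (x :: (g' ++ [l])) ++ [r] = x :: (g' ++ [l]) ++ [r] from rfl,
              pv_render_snoc x (g' ++ [l]) r (by simp)]
      have hinv' : pvLastNS (pvRender ((g ++ [l]) ++ [r])) = pvLastNS r := by
        rw [← hmerge, pvMerge,
            show PySem.Chars.rstrip (pvRender (g ++ [l])) ++ ' ' :: PySem.Chars.strip r
               = PySem.Chars.rstrip (pvRender (g ++ [l])) ++ (' ' :: PySem.Chars.strip r) from rfl,
            pv_lastNS_append, pv_lastNS_cons_space (by decide), pv_lastNS_strip, hc']
      have hrs' : g ++ [l] ≠ [] →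
          PySem.Chars.rstrip (pvRender ((g ++ [l]) ++ [r])) = pvRender ((g ++ [l]) ++ [r]) ∧
          PySem.Chars.strip r ≠ [] := by
        intro _
        refine ⟨?_, hstripr⟩
        have hglast : (pvRender ((g ++ [l]) ++ [r])).getLast? = some c' := by
          rw [← hmerge, pvMerge,
              show PySem.Chars.rstrip (pvRender (g ++ [l])) ++ ' ' :: PySem.Chars.strip r
                 = (PySem.Chars.rstrip (pvRender (g ++ [l])) ++ [' ']) ++ PySem.Chars.strip r from by simp,
              List.getLast?_append_of_ne_nil _ hstripr, pv_getLast?_strip]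
          exact hc'
        exact pv_rstrip_of_last_nonspace hglast (pv_lastNS_isspace hc')
      simp only [pvInnerA, hcond, hglue, if_true, pvChunk, hmerge]
      exact ih (g ++ [l]) r hinv' hrs'
    · -- the flag is down: A stops consuming, B closes the group
      have hglue' : pvGlue l r = false := by simpa using hglue
      simp only [pvInnerA, hcond, hglue', Bool.false_eq_true, if_false, pvChunk]
      rw [show pvOuterA (r :: rs') = (pvInnerA r rs').1 :: pvOuterA (pvInnerA r rs').2 from by
        rw [pvOuterA]]
      congr 1
      have h0 := ih [] r (by rfl) (by simp)
      simpa using h0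

theorem pv_main (ls : List (List Char)) :
    pvOuterA ls = pvChunk [] (ls.zip (pvFlags ls)) := by
  cases ls with
  | nil => simp [pvOuterA, pvFlags, pvChunk]
  | cons l rs =>
    rw [pvOuterA]
    have h0 := pv_gen rs [] l (by rfl) (by simp)
    simpa using h0

-- ===== VERDICT (by name: the statement is the Claim_ definition above) =====
theorem rejoin_column_lines_py_spec : Claim_equal_rejoin_column_lines_py := by
  intro text _
  unfold Spec_rejoin_column_lines_py rejoin_column_lines_py rejoin_column_lines_py_alt
  rw [pv_main]
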